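-- pv_equiv track=rewrite | github.com/lalapopa/fall_guy_bot | key_log_handler.py | connection_two_categories
-- ===== SOURCE A (Python) =====
-- def connection_two_categories(category_one,category_two):
-- 	connected = [num for num in category_one]
--
-- 	for element in category_two:
-- 		if element == 1:
-- 			connected.insert(category_two.index(element), 1)
-- 			connected.pop()
-- 			break
--
-- 	return connected
-- ===== SOURCE B (Python) =====
-- def connection_two_categories(category_one, category_two):
--     out = []
--     prev = 1
--     shifted = False
--     for k, x in enumerate(category_one):
--         if not shifted and k < len(category_two) and category_two[k] == 1:
--             shifted = True
--         if shifted: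
--             out.append(prev)
--             prev = x
--         else:
--             out.append(x)
--     return out
-- ===== Notes on version B (the rewrite author's own statement) =====
-- stated objective: alternative
-- what changed: B is a single fused pass over category_one with an accumulator (out, prev, shifted): it never calls index(), insert() or pop(); instead it checks category_two positionally while walking category_one and, once the shift starts, emits a carried value one position late, which realises insert+pop as a carry.
import Mathlib
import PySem

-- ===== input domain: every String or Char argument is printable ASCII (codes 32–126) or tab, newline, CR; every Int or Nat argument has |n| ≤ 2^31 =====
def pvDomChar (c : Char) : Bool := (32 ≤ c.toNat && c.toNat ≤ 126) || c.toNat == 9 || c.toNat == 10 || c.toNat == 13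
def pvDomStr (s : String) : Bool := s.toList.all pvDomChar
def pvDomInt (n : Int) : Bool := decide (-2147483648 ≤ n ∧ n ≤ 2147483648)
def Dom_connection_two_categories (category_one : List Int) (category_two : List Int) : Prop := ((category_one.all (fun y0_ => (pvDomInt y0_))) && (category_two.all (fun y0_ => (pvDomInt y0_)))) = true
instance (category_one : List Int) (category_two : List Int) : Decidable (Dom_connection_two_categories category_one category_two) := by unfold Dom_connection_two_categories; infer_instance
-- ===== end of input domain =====

-- B replaces A's find-index/insert/pop scheme by a single fused pass over category_one
-- with a carried value (insert+pop realised as a one-position-late emit); objective: alternative.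

-- ===== PORT A =====
-- the for-loop over category_two with its break: recursion over the remaining elements,
-- `category_two.index(element)` looks up the FULL category_two, as in the Python
def connALoop (c2full : List Int) (connected : List Int) : List Int → List Int
  | [] => connected
  | e :: rest =>
    if e = 1 then
      let connected1 := PySem.List.insert connected (((PySem.List.index? c2full e).getD 0 : Nat) : Int) 1
      -- connected.pop(): connected1 is never empty here, the none branch is unreachable
      match PySem.List.pop? connected1 (-1) with
      | some (_, r) => r
      | none => connected1
    else connALoop c2full connected rest

def connection_two_categories (category_one : List Int) (category_two : List Int) : List Int :=
  let connected := category_one.map (fun num => num)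
  connALoop category_two connected category_two

-- ===== PORT B =====
-- one step of the `for k, x in enumerate(category_one)` loop; state = (out, prev, shifted)
def connBStep (c2 : List Int) (st : List Int × Int × Bool) (kx : Int × Int) : List Int × Int × Bool :=
  let shifted := st.2.2 || (decide (kx.1 < (c2.length : Int)) && ((PySem.List.pyGet? c2 kx.1).getD 0 == 1))
  if shifted then (st.1 ++ [st.2.1], kx.2, true) else (st.1 ++ [kx.2], st.2.1, false)

def connection_two_categories_alt (category_one : List Int) (category_two : List Int) : List Int :=
  ((PySem.List.enumerate category_one).foldl (connBStep category_two) ([], 1, false)).1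

-- ===== PRECONDITION & SPEC =====
def Spec_connection_two_categories (category_one : List Int) (category_two : List Int) (out : List Int) : Prop := out = connection_two_categories_alt category_one category_two
instance (category_one : List Int) (category_two : List Int) (out : List Int) : Decidable (Spec_connection_two_categories category_one category_two out) := by unfold Spec_connection_two_categories; infer_instance

-- ===== CLAIM =====
def Claim_equal_connection_two_categories : Prop := ∀ (category_one : List Int) (category_two : List Int), Dom_connection_two_categories category_one category_two → Spec_connection_two_categories category_one category_two (connection_two_categories category_one category_two)

-- ===== LEMMAS AND PROOFS =====

-- Python's insert clamps the position to the length; take/drop clamp the same way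
theorem insert_natCast_all (xs : List Int) (i : Nat) (v : Int) :
    PySem.List.insert xs (i : Int) v = xs.take i ++ v :: xs.drop i := by
  by_cases h : i ≤ xs.length
  · exact PySem.List.insert_natCast xs i v h
  · rw [List.take_of_length_le (by omega), List.drop_of_length_le (by omega)]
    unfold PySem.List.insert PySem.List.sliceIndices
    have h0 : ¬ ((i:Int) < 0) := by omega
    simp only [if_neg h0]
    norm_num
    rw [show (min (↑i : Int) ↑xs.length).toNat = xs.length by omega]
    simp [List.take_of_length_le, List.drop_of_length_le]

-- pop() = pop(-1) returns the last element and leaves the rest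
theorem pop_neg_one {α : Type} (l : List α) (h : l ≠ []) :
    PySem.List.pop? l = some (l.getLast h, l.dropLast) := by
  conv_lhs => rw [← List.dropLast_concat_getLast h]
  rw [PySem.List.pop?_last]

theorem connALoop_no_one (c2full connected rest : List Int) (h : (1 : Int) ∉ rest) :
    connALoop c2full connected rest = connected := by
  induction rest with
  | nil => rfl
  | cons e t ih =>
    simp only [List.mem_cons, not_or] at h
    simp only [connALoop]
    rw [if_neg (fun he => h.1 he.symm)]
    exact ih h.2

theorem connALoop_one (c2full connected rest : List Int) (h : (1 : Int) ∈ rest) :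
    connALoop c2full connected rest =
      match PySem.List.pop? (PySem.List.insert connected (((PySem.List.index? c2full 1).getD 0 : Nat) : Int) 1) (-1) with
      | some (_, r) => r
      | none => PySem.List.insert connected (((PySem.List.index? c2full 1).getD 0 : Nat) : Int) 1 := by
  induction rest with
  | nil => cases h
  | cons e t ih =>
    by_cases he : e = 1
    · subst he; simp [connALoop]
    · simp only [connALoop, if_neg he]
      exact ih (by cases h with | head => exact absurd rfl he | tail _ h => exact h)

-- A's value: identity when 1 ∉ c2, else (take i ++ 1 :: drop i).dropLast at the first index i of 1
theorem connA_char (c1 c2 : List Int) :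
    connection_two_categories c1 c2 =
      match PySem.List.index? c2 1 with
      | none => c1
      | some i => (c1.take i ++ 1 :: c1.drop i).dropLast := by
  unfold connection_two_categories
  simp only [List.map_id']
  cases hidx : PySem.List.index? c2 1 with
  | none =>
    exact connALoop_no_one _ _ _ ((PySem.List.index?_eq_none_iff c2 1).mp hidx)
  | some i =>
    have hmem : (1 : Int) ∈ c2 := (PySem.List.index?_isSome_iff c2 1).mp (by rw [hidx]; rfl)
    rw [connALoop_one _ _ _ hmem, hidx]
    simp only [Option.getD_some]
    rw [insert_natCast_all]
    have hne : (c1.take i ++ 1 :: c1.drop i) ≠ [] := by simp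
    rw [pop_neg_one _ hne]

-- once shifted is true, the loop emits the carried value one position late and drops the last
theorem connB_run_shifted (c2 xs out : List Int) (prev : Int) (s : Int) :
    ((PySem.List.enumerate xs s).foldl (connBStep c2) (out, prev, true)).1
      = out ++ (prev :: xs).dropLast := by
  induction xs generalizing out prev s with
  | nil => simp [PySem.List.enumerate_nil]
  | cons x t ih =>
    rw [PySem.List.enumerate_cons, List.foldl_cons]
    show ((PySem.List.enumerate t (s+1)).foldl (connBStep c2) (connBStep c2 (out, prev, true) (s, x))).1 = _
    simp only [connBStep, Bool.true_or, if_true]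
    rw [ih]
    cases t <;> simp

-- while no trigger occurs, the loop copies category_one
theorem connB_run_quiet (c2 xs out : List Int) (prev : Int) (s : Nat)
    (h : ∀ j : Nat, j < xs.length → s + j < c2.length → c2.getD (s + j) 0 ≠ 1) :
    (PySem.List.enumerate xs (s : Int)).foldl (connBStep c2) (out, prev, false)
      = (out ++ xs, prev, false) := by
  induction xs generalizing out s with
  | nil => simp [PySem.List.enumerate_nil]
  | cons x t ih =>
    rw [PySem.List.enumerate_cons, List.foldl_cons]
    have hcond : (decide ((s : Int) < (c2.length : Int)) && ((PySem.List.pyGet? c2 (s : Int)).getD 0 == 1)) = false := by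
      by_cases hs : s < c2.length
      · have hne : c2[s] ≠ 1 := by
          have := h 0 (by simp) (by omega)
          simpa [List.getD, List.getElem?_eq_getElem hs] using this
        simp [List.getElem?_eq_getElem hs, hne]
      · simp
        omega
    show (PySem.List.enumerate t ((s:Int)+1)).foldl (connBStep c2) (connBStep c2 (out, prev, false) ((s:Int), x)) = _
    simp only [connBStep, Bool.false_or, hcond, Bool.false_eq_true, ite_false]
    have : ((s : Int) + 1) = ((s + 1 : Nat) : Int) := by push_cast; ring
    rw [this, ih (out ++ [x]) (s + 1) (fun j hj hlt => by
      have := h (j + 1) (by simpa using Nat.succ_lt_succ hj) (by omega)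
      simpa [Nat.add_comm, Nat.add_assoc, Nat.add_left_comm] using this)]
    simp

-- B's value: same characterisation as A's
theorem connB_char (c1 c2 : List Int) :
    connection_two_categories_alt c1 c2 =
      match PySem.List.index? c2 1 with
      | none => c1
      | some i => (c1.take i ++ 1 :: c1.drop i).dropLast := by
  unfold connection_two_categories_alt
  cases hidx : PySem.List.index? c2 1 with
  | none =>
    have hno : (1 : Int) ∉ c2 := (PySem.List.index?_eq_none_iff c2 1).mp hidx
    have key := connB_run_quiet c2 c1 [] 1 0 (fun j _ hlt h1 => by
      have hj : 0 + j < c2.length := hlt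
      rw [List.getD_eq_getElem c2 0 hj] at h1
      exact hno (h1 ▸ List.getElem_mem hj))
    simp only [Nat.cast_zero] at key
    rw [key]
    simp
  | some i =>
    obtain ⟨hi, hci, hbefore⟩ := PySem.List.getElem_of_index?_eq_some hidx
    by_cases hlen : i < c1.length
    · -- quiet up to i, trigger at i, shifted run afterwards
      have hsplit : c1 = c1.take i ++ c1[i] :: c1.drop (i + 1) := by
        rw [List.getElem_cons_drop, List.take_append_drop]
      conv_lhs => rw [hsplit]
      rw [show (0 : Int) = ((0 : Nat) : Int) from rfl,
          PySem.List.enumerate_append, List.foldl_append]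
      rw [connB_run_quiet c2 _ [] 1 0 (fun j hj _ h1 => by
        have hj' : j < i := by simpa [min_eq_left (Nat.le_of_lt hlen)] using hj
        rw [List.getD_eq_getElem c2 0 (by omega : 0 + j < c2.length)] at h1
        exact hbefore j hj' (by simpa using h1))]
      have hlentake : (c1.take i).length = i := by simp [min_eq_left (Nat.le_of_lt hlen)]
      rw [PySem.List.enumerate_cons, List.foldl_cons]
      have harg : ((0:Nat):Int) + ((c1.take i).length : Int) = ((i : Nat) : Int) := by
        rw [hlentake]; push_cast; ring
      have hcond : (decide (((0:Nat):Int) + ((c1.take i).length : Int) < (c2.length : Int)) && ((PySem.List.pyGet? c2 (((0:Nat):Int) + ((c1.take i).length : Int))).getD 0 == 1)) = true := by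
        rw [harg]
        simp [hci, hi]
      show ((PySem.List.enumerate (c1.drop (i+1)) _).foldl (connBStep c2)
        (connBStep c2 (([] : List Int) ++ c1.take i, 1, false) (((0:Nat):Int) + ((c1.take i).length : Int), c1[i]))).1 = _
      simp only [connBStep, Bool.false_or, hcond, if_pos]
      rw [connB_run_shifted]
      have : (c1[i] :: c1.drop (i+1)) = c1.drop i := by
        rw [List.getElem_cons_drop]
      simp only [List.nil_append, List.append_assoc]
      rw [this]
      have hd : c1.drop i ≠ [] := by simp; omega
      rw [List.dropLast_append_of_ne_nil (l' := c1.take i) (by simp),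
          show (1 :: c1.drop i : List Int) = [1] ++ c1.drop i from rfl,
          List.dropLast_append_of_ne_nil (l' := [1]) hd]
    · -- first 1 of c2 lies at or beyond c1's end: both sides are c1
      have key := connB_run_quiet c2 c1 [] 1 0 (fun j hj hlt h1 => by
        rw [List.getD_eq_getElem c2 0 (by omega : 0 + j < c2.length)] at h1
        exact hbefore j (by omega) (by simpa using h1))
      simp only [Nat.cast_zero] at key
      rw [key]
      show c1 = (c1.take i ++ 1 :: c1.drop i).dropLast
      rw [List.take_of_length_le (l := c1) (by omega), List.drop_of_length_le (l := c1) (by omega)]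
      simp

-- ===== VERDICT =====
theorem connection_two_categories_spec : Claim_equal_connection_two_categories := by
  intro c1 c2 _
  unfold Spec_connection_two_categories
  rw [connA_char, connB_char]
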